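-- pv_equiv track=rewrite | github.com/jaimezuluagold/pokerai | hand_evaluator copy.py | _compare_same_rank_hands
-- ===== SOURCE A (Python) =====
-- from typing import Dict, List, Tuple, Set, Optional, Any
--
-- CARD_VALUES = ['2', '3', '4', '5', '6', '7', '8', '9', '10', 'J', 'Q', 'K', 'A']
--
-- def _compare_same_rank_hands(
--                             hand1_cards: List[Tuple[str, str]],
--                             hand2_cards: List[Tuple[str, str]],
--                             hand1_kickers: List[Tuple[str, str]],
--                             hand2_kickers: List[Tuple[str, str]]) -> int:
--     """
--     Compare two hands of the same rank.
--
--     Args: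
--         hand1_cards: First hand cards
--         hand2_cards: Second hand cards
--         hand1_kickers: First hand kickers
--         hand2_kickers: Second hand kickers
--
--     Returns:
--         1 if first hand is better, -1 if second hand is better, 0 if tie
--     """
--     # Compare main hand cards first by value
--     hand1_values = [CARD_VALUES.index(card[0]) for card in hand1_cards]
--     hand2_values = [CARD_VALUES.index(card[0]) for card in hand2_cards]
--
--     hand1_values.sort(reverse=True)
--     hand2_values.sort(reverse=True)
--
--     for v1, v2 in zip(hand1_values, hand2_values):
--         if v1 > v2:
--             return 1
--         elif v1 < v2:
--             return -1
--
--     # If main cards tied, compare kickers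
--     kicker1_values = [CARD_VALUES.index(card[0]) for card in hand1_kickers]
--     kicker2_values = [CARD_VALUES.index(card[0]) for card in hand2_kickers]
--
--     kicker1_values.sort(reverse=True)
--     kicker2_values.sort(reverse=True)
--
--     # Compare as many kickers as available
--     for v1, v2 in zip(kicker1_values, kicker2_values):
--         if v1 > v2:
--             return 1
--         elif v1 < v2:
--             return -1
--
--     # If everything is tied
--     return 0
-- ===== SOURCE B (Python) =====
-- from typing import List, Tuple
--
-- CARD_VALUES = ['2', '3', '4', '5', '6', '7', '8', '9', '10', 'J', 'Q', 'K', 'A']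
-- RANK_INDEX = {r: i for i, r in enumerate(CARD_VALUES)}
-- NUM_RANKS = 13
--
--
-- def _counts(cards):
--     cnt = [0] * NUM_RANKS
--     for card in cards:
--         cnt[RANK_INDEX[card[0]]] += 1
--     return cnt
--
--
-- def _bucket_cmp(cnt1, cnt2, budget):
--     # Scan rank buckets from highest to lowest, spending a shared budget of
--     # `budget` cards per hand (the top `budget` cards of each hand).
--     rem = budget
--     for r in range(NUM_RANKS - 1, -1, -1):
--         t1 = min(cnt1[r], rem)
--         t2 = min(cnt2[r], rem)
--         if t1 != t2:
--             return 1 if t1 > t2 else -1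
--         rem -= t1
--         if rem == 0:
--             return 0
--     return 0
--
--
-- def _compare_same_rank_hands(hand1_cards: List[Tuple[str, str]],
--                              hand2_cards: List[Tuple[str, str]],
--                              hand1_kickers: List[Tuple[str, str]],
--                              hand2_kickers: List[Tuple[str, str]]) -> int:
--     c1 = _counts(hand1_cards)
--     c2 = _counts(hand2_cards)
--     k1 = _counts(hand1_kickers)
--     k2 = _counts(hand2_kickers)
--     r = _bucket_cmp(c1, c2, min(len(hand1_cards), len(hand2_cards)))
--     if r:
--         return r
--     return _bucket_cmp(k1, k2, min(len(hand1_kickers), len(hand2_kickers)))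
-- ===== Notes on version B (the rewrite author's own statement) =====
-- stated objective: alternative
-- what changed: Replaces index-lookup + sort + find-first-difference scans by rank-bucket counting: one pass tallies each hand into 13 rank buckets via a precomputed rank->index dict, and a single descending scan over the buckets with a shared card budget decides the comparison without ever sorting.
-- outside the precondition, e.g. on _compare_same_rank_hands([('A', 's')], [('2', 's')], [('X', 's')], []): A returns 1, B raises KeyError
import Mathlib
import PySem

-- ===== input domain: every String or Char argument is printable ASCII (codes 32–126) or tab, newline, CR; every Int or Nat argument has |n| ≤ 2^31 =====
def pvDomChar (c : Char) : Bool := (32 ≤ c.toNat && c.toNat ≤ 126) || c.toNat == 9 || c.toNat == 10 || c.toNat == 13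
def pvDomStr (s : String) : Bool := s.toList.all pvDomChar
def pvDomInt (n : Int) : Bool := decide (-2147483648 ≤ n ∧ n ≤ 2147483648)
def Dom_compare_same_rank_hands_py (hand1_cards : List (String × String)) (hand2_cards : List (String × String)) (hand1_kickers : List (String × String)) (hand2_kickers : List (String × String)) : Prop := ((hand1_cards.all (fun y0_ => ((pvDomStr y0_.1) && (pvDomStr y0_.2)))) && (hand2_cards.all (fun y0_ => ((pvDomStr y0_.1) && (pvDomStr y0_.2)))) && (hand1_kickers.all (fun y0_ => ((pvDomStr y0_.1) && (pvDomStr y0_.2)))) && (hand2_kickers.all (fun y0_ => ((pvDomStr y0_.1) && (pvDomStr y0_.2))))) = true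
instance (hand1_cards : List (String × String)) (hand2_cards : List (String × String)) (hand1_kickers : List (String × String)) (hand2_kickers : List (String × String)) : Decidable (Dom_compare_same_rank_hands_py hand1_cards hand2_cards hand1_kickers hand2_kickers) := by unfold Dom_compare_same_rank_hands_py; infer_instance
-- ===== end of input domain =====

-- B replaces A's index-then-sort-then-scan by rank-bucket counting: it counts cards
-- per rank once and compares bucket counts from the highest rank down under a shared
-- budget, never sorting (objective: alternative).


-- ===== PORT A =====
def CARD_VALUES : List String :=
  ["2", "3", "4", "5", "6", "7", "8", "9", "10", "J", "Q", "K", "A"]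

-- [CARD_VALUES.index(card[0]) for card in cards]  — none exactly where Python's
-- list.index raises ValueError (an unknown card value)
def pvVals? (cards : List (String × String)) : Option (List Int) :=
  cards.mapM (fun c => (PySem.List.index? CARD_VALUES c.1).map (fun n => (n : Int)))

-- the 'for v1, v2 in zip(...): if v1 > v2: return 1 elif v1 < v2: return -1' loop
def pvZipLoop : List Int → List Int → Option Int
  | v1 :: t1, v2 :: t2 =>
    if v1 > v2 then some 1 else if v1 < v2 then some (-1) else pvZipLoop t1 t2
  | _, _ => none

def compare_same_rank_hands_py (hand1_cards : List (String × String)) (hand2_cards : List (String × String)) (hand1_kickers : List (String × String)) (hand2_kickers : List (String × String)) : Int :=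
  match pvVals? hand1_cards, pvVals? hand2_cards with
  | some v1, some v2 =>
    let s1 := PySem.List.sorted v1 (fun x => x) true
    let s2 := PySem.List.sorted v2 (fun x => x) true
    match pvZipLoop s1 s2 with
    | some r => r
    | none =>
      match pvVals? hand1_kickers, pvVals? hand2_kickers with
      | some w1, some w2 =>
        let t1 := PySem.List.sorted w1 (fun x => x) true
        let t2 := PySem.List.sorted w2 (fun x => x) true
        match pvZipLoop t1 t2 with
        | some r => r
        | none => 0
      | _, _ => 0   -- unreachable under Pre_
  | _, _ => 0       -- unreachable under Pre_

-- ===== PORT B =====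
-- RANK_INDEX = {r: i for i, r in enumerate(CARD_VALUES)}
def pvRankIndex : PySem.Dict String Int :=
  PySem.Dict.ofList
    [("2", 0), ("3", 1), ("4", 2), ("5", 3), ("6", 4), ("7", 5), ("8", 6),
     ("9", 7), ("10", 8), ("J", 9), ("Q", 10), ("K", 11), ("A", 12)]

-- _counts: cnt = [0]*13; for card in cards: cnt[RANK_INDEX[card[0]]] += 1
-- none exactly where Python's dict lookup raises KeyError (an unknown card value).
-- The dict's values are the literals 0..12, so '.toNat' on the looked-up index is
-- exact (the index is never negative).
def pvCounts? (cards : List (String × String)) : Option (List Int) :=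
  cards.foldlM
    (fun cnt c =>
      (PySem.Dict.get? pvRankIndex c.1).map (fun i => cnt.modify i.toNat (· + 1)))
    (List.replicate 13 0)

-- _bucket_cmp: for r in range(12, -1, -1): t_i = min(cnt_i[r], rem); …
-- cnt_i has length 13 and r runs over 0..12, so pyGetD is exact plain indexing.
def pvBucketLoop (cnt1 cnt2 : List Int) : List Int → Int → Int
  | [], _ => 0
  | r :: rs, rem =>
    let t1 := min (PySem.List.pyGetD cnt1 r 0) rem
    let t2 := min (PySem.List.pyGetD cnt2 r 0) rem
    if t1 ≠ t2 then (if t1 > t2 then 1 else -1)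
    else if rem - t1 = 0 then 0
    else pvBucketLoop cnt1 cnt2 rs (rem - t1)

def compare_same_rank_hands_py_alt (hand1_cards : List (String × String)) (hand2_cards : List (String × String)) (hand1_kickers : List (String × String)) (hand2_kickers : List (String × String)) : Int :=
  match pvCounts? hand1_cards with
  | none => 0   -- unreachable under Pre_
  | some c1 =>
  match pvCounts? hand2_cards with
  | none => 0   -- unreachable under Pre_
  | some c2 =>
  match pvCounts? hand1_kickers with
  | none => 0   -- unreachable under Pre_
  | some d1 =>
  match pvCounts? hand2_kickers with
  | none => 0   -- unreachable under Pre_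
  | some d2 =>
    let r := pvBucketLoop c1 c2 (PySem.List.pyRange 12 (-1) (-1))
               (min (hand1_cards.length : Int) (hand2_cards.length : Int))
    if r ≠ 0 then r
    else pvBucketLoop d1 d2 (PySem.List.pyRange 12 (-1) (-1))
           (min (hand1_kickers.length : Int) (hand2_kickers.length : Int))

-- ===== PRECONDITION & SPEC =====
-- Pre_ excludes the inputs on which a lookup of a card value outside CARD_VALUES
-- raises (ValueError in A, KeyError in B).  It slightly narrows A's domain: A still
-- returns when only a KICKER list holds an unknown card but the main cards already
-- decide the comparison (A computes kicker indices lazily); B counts all four lists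
-- up front and raises there, so those inputs are excluded too.
def Pre_compare_same_rank_hands_py (hand1_cards : List (String × String)) (hand2_cards : List (String × String)) (hand1_kickers : List (String × String)) (hand2_kickers : List (String × String)) : Prop :=
  (∀ c ∈ hand1_cards, c.1 ∈ CARD_VALUES) ∧ (∀ c ∈ hand2_cards, c.1 ∈ CARD_VALUES) ∧
  (∀ c ∈ hand1_kickers, c.1 ∈ CARD_VALUES) ∧ (∀ c ∈ hand2_kickers, c.1 ∈ CARD_VALUES)
instance (hand1_cards : List (String × String)) (hand2_cards : List (String × String)) (hand1_kickers : List (String × String)) (hand2_kickers : List (String × String)) : Decidable (Pre_compare_same_rank_hands_py hand1_cards hand2_cards hand1_kickers hand2_kickers) := by unfold Pre_compare_same_rank_hands_py; infer_instance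

def pvWitness_compare_same_rank_hands_py : (List (String × String)) × (List (String × String)) × (List (String × String)) × (List (String × String)) :=
  ([("A", "s"), ("A", "h")], [("K", "s"), ("K", "h")], [("Q", "d")], [("J", "c")])

def Spec_compare_same_rank_hands_py (hand1_cards : List (String × String)) (hand2_cards : List (String × String)) (hand1_kickers : List (String × String)) (hand2_kickers : List (String × String)) (out : Int) : Prop := out = compare_same_rank_hands_py_alt hand1_cards hand2_cards hand1_kickers hand2_kickers
instance (hand1_cards : List (String × String)) (hand2_cards : List (String × String)) (hand1_kickers : List (String × String)) (hand2_kickers : List (String × String)) (out : Int) : Decidable (Spec_compare_same_rank_hands_py hand1_cards hand2_cards hand1_kickers hand2_kickers out) := by unfold Spec_compare_same_rank_hands_py; infer_instance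

-- ===== CLAIM (what is proved, stated in full; the proofs are below) =====
def Claim_equal_compare_same_rank_hands_py : Prop := ∀ (hand1_cards : List (String × String)) (hand2_cards : List (String × String)) (hand1_kickers : List (String × String)) (hand2_kickers : List (String × String)), Dom_compare_same_rank_hands_py hand1_cards hand2_cards hand1_kickers hand2_kickers → Pre_compare_same_rank_hands_py hand1_cards hand2_cards hand1_kickers hand2_kickers → Spec_compare_same_rank_hands_py hand1_cards hand2_cards hand1_kickers hand2_kickers (compare_same_rank_hands_py hand1_cards hand2_cards hand1_kickers hand2_kickers)

-- ===== LEMMAS AND PROOFS =====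

theorem pvRankLookup (s : String) (h : s ∈ CARD_VALUES) :
    ∃ k : Nat, k < 13 ∧ PySem.List.index? CARD_VALUES s = some k ∧
      PySem.Dict.get? pvRankIndex s = some (k : Int) := by
  simp only [CARD_VALUES, List.mem_cons, List.not_mem_nil, or_false] at h
  rcases h with h|h|h|h|h|h|h|h|h|h|h|h|h <;> subst h
  · exact ⟨0, by omega, by decide, by decide⟩
  · exact ⟨1, by omega, by decide, by decide⟩
  · exact ⟨2, by omega, by decide, by decide⟩
  · exact ⟨3, by omega, by decide, by decide⟩
  · exact ⟨4, by omega, by decide, by decide⟩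
  · exact ⟨5, by omega, by decide, by decide⟩
  · exact ⟨6, by omega, by decide, by decide⟩
  · exact ⟨7, by omega, by decide, by decide⟩
  · exact ⟨8, by omega, by decide, by decide⟩
  · exact ⟨9, by omega, by decide, by decide⟩
  · exact ⟨10, by omega, by decide, by decide⟩
  · exact ⟨11, by omega, by decide, by decide⟩
  · exact ⟨12, by omega, by decide, by decide⟩

theorem pvCountsFold (cards : List (String × String)) (h : ∀ c ∈ cards, c.1 ∈ CARD_VALUES)
    (acc : List Int) (w : List Int) (hlen : acc.length = 13)
    (hacc : ∀ r : Int, 0 ≤ r → r < 13 → PySem.List.pyGetD acc r 0 = (w.count r : Int)) :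
    ∃ v c,
      cards.mapM (fun c => (PySem.List.index? CARD_VALUES c.1).map (fun n => (n : Int))) = some v ∧
      cards.foldlM (fun cnt c => (PySem.Dict.get? pvRankIndex c.1).map (fun i => cnt.modify i.toNat (· + 1))) acc = some c ∧
      v.length = cards.length ∧ c.length = 13 ∧ (∀ x ∈ v, 0 ≤ x ∧ x < 13) ∧
      (∀ r : Int, 0 ≤ r → r < 13 → PySem.List.pyGetD c r 0 = ((w ++ v).count r : Int)) := by
  induction cards generalizing acc w with
  | nil =>
    exact ⟨[], acc, rfl, rfl, rfl, hlen, by simp, by simpa using hacc⟩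
  | cons cd cds ih =>
    obtain ⟨k, hk13, hidx, hget⟩ := pvRankLookup cd.1 (h cd List.mem_cons_self)
    have hlen' : (acc.modify k (· + 1)).length = 13 := by
      simpa using hlen
    have hacc' : ∀ r : Int, 0 ≤ r → r < 13 →
        PySem.List.pyGetD (acc.modify k (· + 1)) r 0 = (((w ++ [(k : Int)]).count r : Nat) : Int) := by
      intro r hr0 hr13
      have hracc := hacc r hr0 hr13
      rw [PySem.List.pyGetD_eq_getElem _ _ hr0 (by rw [hlen']; omega)]
      rw [PySem.List.pyGetD_eq_getElem _ _ hr0 (by rw [hlen]; omega)] at hracc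
      rw [List.getElem_modify]
      rw [List.count_append, List.count_singleton]
      by_cases hkr : k = r.toNat
      · rw [if_pos hkr, hracc]
        have : ((k : Int) == r) = true := by simp; omega
        rw [this]
        simp
      · rw [if_neg hkr, hracc]
        have : ((k : Int) == r) = false := by simp; omega
        rw [this]
        simp
    obtain ⟨v', c, hmap, hfold, hvl, hcl, hvb, hcnt⟩ :=
      ih (fun x hx => h x (List.mem_cons_of_mem _ hx)) (acc.modify k (· + 1)) (w ++ [(k : Int)]) hlen' hacc'
    refine ⟨(k : Int) :: v', c, ?_, ?_, by simp [hvl], hcl, ?_, ?_⟩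
    · rw [List.mapM_cons, hidx, hmap]
      rfl
    · rw [List.foldlM_cons, hget]
      simpa using hfold
    · intro x hx
      rcases List.mem_cons.mp hx with hx | hx
      · subst hx; constructor <;> [positivity; exact_mod_cast hk13]
      · exact hvb x hx
    · intro r hr0 hr13
      rw [hcnt r hr0 hr13]
      congr 1
      rw [List.append_assoc, List.singleton_append]

theorem pvCountsVals (cards : List (String × String))
    (h : ∀ c ∈ cards, c.1 ∈ CARD_VALUES) :
    ∃ v c, pvVals? cards = some v ∧ pvCounts? cards = some c ∧
      v.length = cards.length ∧ c.length = 13 ∧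
      (∀ x ∈ v, 0 ≤ x ∧ x < 13) ∧
      (∀ r : Int, 0 ≤ r → r < 13 → PySem.List.pyGetD c r 0 = (v.count r : Int)) := by
  obtain ⟨v, c, h1, h2, h3, h4, h5, h6⟩ := pvCountsFold cards h (List.replicate 13 0) []
    (by simp)
    (fun r hr0 hr13 => by
      rw [PySem.List.pyGetD_eq_getElem _ _ hr0 (by simp; omega), List.getElem_replicate]
      simp)
  exact ⟨v, c, h1, h2, h3, h4, h5, by simpa using h6⟩

theorem pvZipLoop_take (a b : List Int) :
    pvZipLoop a b =
      pvZipLoop (a.take (min a.length b.length)) (b.take (min a.length b.length)) := by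
  induction a generalizing b with
  | nil => cases b <;> rfl
  | cons x t ih =>
    cases b with
    | nil => rfl
    | cons y u =>
      simp only [List.length_cons, Nat.succ_min_succ, List.take_succ_cons, pvZipLoop]
      split_ifs <;> [rfl; rfl; exact ih u]

theorem pvZipLoop_ne_zero (a b : List Int) (r : Int) (h : pvZipLoop a b = some r) :
    r ≠ 0 := by
  induction a generalizing b with
  | nil => cases b <;> simp [pvZipLoop] at h
  | cons x t ih =>
    cases b with
    | nil => simp [pvZipLoop] at h
    | cons y u =>
      simp only [pvZipLoop] at h
      split_ifs at h with h1 h2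
      · simp at h; omega
      · simp at h; omega
      · exact ih u h

theorem pvZipLoop_replicate (x : Int) (p : Nat) (a b : List Int) :
    pvZipLoop (List.replicate p x ++ a) (List.replicate p x ++ b) = pvZipLoop a b := by
  induction p with
  | zero => rfl
  | succ q ih =>
    simp only [List.replicate_succ, List.cons_append, pvZipLoop, lt_irrefl, if_false]
    simpa using ih

theorem pvDescSplit (s : List Int) (m : Int) (hs : s.Pairwise (· ≥ ·))
    (hb : ∀ x ∈ s, x ≤ m) :
    ∃ t, s = List.replicate (s.count m) m ++ t ∧ t.Pairwise (· ≥ ·) ∧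
      ∀ x ∈ t, x < m := by
  induction s with
  | nil => exact ⟨[], by simp, List.Pairwise.nil, by simp⟩
  | cons x s ih =>
    rcases List.pairwise_cons.mp hs with ⟨hx, hs'⟩
    by_cases hxm : x = m
    · subst hxm
      obtain ⟨t, he, ht, hlt⟩ := ih hs' (fun y hy => le_trans (hx y hy) (hb x (by simp)))
      refine ⟨t, ?_, ht, hlt⟩
      rw [List.count_cons_self, List.replicate_succ, List.cons_append, ← he]
    · have hxlt : x < m := lt_of_le_of_ne (hb x (by simp)) hxm
      have hcz : (x :: s).count m = 0 := by
        rw [List.count_eq_zero]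
        intro hm
        rcases List.mem_cons.mp hm with h|h
        · exact hxm h.symm
        · exact absurd (lt_of_le_of_lt (hx m h) hxlt) (lt_irrefl m)
      refine ⟨x :: s, by rw [hcz]; rfl, hs, ?_⟩
      intro y hy
      rcases List.mem_cons.mp hy with h|h
      · exact h ▸ hxlt
      · exact lt_of_le_of_lt (hx y h) hxlt

theorem pvZipLoop_swap (a b : List Int) :
    pvZipLoop b a = (pvZipLoop a b).map (fun r => -r) := by
  induction a generalizing b with
  | nil => cases b <;> rfl
  | cons x t ih =>
    cases b with
    | nil => rfl
    | cons y u =>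
      simp only [pvZipLoop]
      split_ifs <;> first | rfl | omega | (exact ih u)

theorem pvZipTopWin (n : Int) (k1 k2 rem : Nat) (a b : List Int)
    (hb : ∀ x ∈ b, x < n) (hmin : min k2 rem < min k1 rem) (hlen : rem ≤ k2 + b.length) :
    pvZipLoop ((List.replicate k1 n ++ a).take rem) ((List.replicate k2 n ++ b).take rem) = some 1 := by
  have hk2r : k2 < rem := by omega
  have hk2 : min rem k2 = k2 := by omega
  have hd : 0 < min rem k1 - k2 := by omega
  rw [List.take_append, List.take_append, List.take_replicate, List.take_replicate, hk2]
  have hsplit : min rem k1 = k2 + (min rem k1 - k2) := by omega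
  rw [hsplit, List.replicate_add, List.append_assoc, pvZipLoop_replicate]
  have hbt : b.take (rem - k2) ≠ [] := by
    simp only [ne_eq, List.take_eq_nil_iff, not_or]
    refine ⟨by omega, ?_⟩
    intro hb0; subst hb0; simp at hlen; omega
  obtain ⟨y, u, hyu⟩ := List.exists_cons_of_ne_nil hbt
  simp only [List.length_replicate]
  have hy : y < n := hb y (List.take_subset _ _ (hyu ▸ List.mem_cons_self))
  rw [hyu]
  have : min rem k1 - k2 = (min rem k1 - k2 - 1) + 1 := by omega
  rw [this, List.replicate_succ, List.cons_append]
  simp only [pvZipLoop]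
  rw [if_pos hy]

theorem pvBucket_eq_zip (n : Nat) (s1 s2 : List Int)
    (h1 : s1.Pairwise (· ≥ ·)) (h2 : s2.Pairwise (· ≥ ·))
    (e1 : ∀ x ∈ s1, 0 ≤ x ∧ x < n) (e2 : ∀ x ∈ s2, 0 ≤ x ∧ x < n)
    (c1 c2 : List Int)
    (hc1 : ∀ r : Int, 0 ≤ r → r < n → PySem.List.pyGetD c1 r 0 = (s1.count r : Int))
    (hc2 : ∀ r : Int, 0 ≤ r → r < n → PySem.List.pyGetD c2 r 0 = (s2.count r : Int))
    (rem : Nat) (hr1 : rem ≤ s1.length) (hr2 : rem ≤ s2.length) :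
    pvBucketLoop c1 c2 (PySem.List.pyRange ((n : Int) - 1) (-1) (-1)) (rem : Int) =
      (pvZipLoop (s1.take rem) (s2.take rem)).getD 0 := by
  induction n generalizing s1 s2 rem h1 h2 hr1 hr2 with
  | zero =>
    have hs1 : s1 = [] := by
      cases s1 with
      | nil => rfl
      | cons x t => exact absurd (e1 x List.mem_cons_self) (by omega)
    subst hs1
    simp only [List.length_nil, Nat.le_zero] at hr1
    subst hr1
    rw [PySem.List.pyRange_neg_one_eq_nil (by omega)]
    rfl
  | succ m ih =>
    -- split both descending lists at the top rank m
    obtain ⟨t1l, hs1, ht1p, ht1lt⟩ := pvDescSplit s1 (m : Int) h1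
      (fun x hx => by have := e1 x hx; push_cast at this ⊢; omega)
    obtain ⟨t2l, hs2, ht2p, ht2lt⟩ := pvDescSplit s2 (m : Int) h2
      (fun x hx => by have := e2 x hx; push_cast at this ⊢; omega)
    set k1 := s1.count (m : Int) with hk1
    set k2 := s2.count (m : Int) with hk2
    have hl1 : s1.length = k1 + t1l.length := by rw [hs1]; simp
    have hl2 : s2.length = k2 + t2l.length := by rw [hs2]; simp
    have hcast : ((m + 1 : Nat) : Int) - 1 = (m : Int) := by push_cast; ring
    rw [hcast, PySem.List.pyRange_neg_one_cons (by omega)]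
    have hg1 : PySem.List.pyGetD c1 (m : Int) 0 = (k1 : Int) :=
      hc1 (m : Int) (by omega) (by push_cast; omega)
    have hg2 : PySem.List.pyGetD c2 (m : Int) 0 = (k2 : Int) := 
      hc2 (m : Int) (by omega) (by push_cast; omega)
    simp only [pvBucketLoop, hg1, hg2]
    have hm1 : min (k1 : Int) (rem : Int) = ((min k1 rem : Nat) : Int) := by push_cast; omega
    have hm2 : min (k2 : Int) (rem : Int) = ((min k2 rem : Nat) : Int) := by push_cast; omega
    rw [hm1, hm2]
    by_cases hne : min k1 rem = min k2 rem
    · -- equal buckets: recurse or stop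
      rw [if_neg (by simp [hne])]
      by_cases hstop : rem = min k1 rem
      · -- rem exhausted here
        rw [if_pos (by omega)]
        have hrk1 : rem ≤ k1 := by omega
        have hrk2 : rem ≤ k2 := by omega
        rw [hs1, hs2, List.take_append, List.take_append, List.take_replicate,
            List.take_replicate]
        simp only [List.length_replicate]
        rw [Nat.min_eq_left hrk1, Nat.min_eq_left hrk2,
            Nat.sub_eq_zero_of_le hrk1, Nat.sub_eq_zero_of_le hrk2]
        simp only [List.take_zero, List.append_nil]
        have hz := pvZipLoop_replicate (m : Int) rem ([] : List Int) ([] : List Int)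
        simp only [List.append_nil] at hz
        rw [hz]
        rfl
      · -- strip the equal top block and recurse
        have hmin_lt : min k1 rem < rem := by omega
        have hk1e : min k1 rem = k1 := by omega
        have hk2e : min k2 rem = k2 := by omega
        rw [if_neg (by push_cast; omega)]
        have hrecast : (rem : Int) - ((min k1 rem : Nat) : Int) = ((rem - k1 : Nat) : Int) := by
          push_cast; omega
        rw [hrecast]
        have hcnt1' : ∀ r : Int, 0 ≤ r → r < m → PySem.List.pyGetD c1 r 0 = (t1l.count r : Int) := by
          intro r hr0 hrm
          rw [hc1 r hr0 (by push_cast; omega)]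
          congr 1
          rw [hs1, List.count_append, List.count_replicate, if_neg (by simp; omega)]
          omega
        have hcnt2' : ∀ r : Int, 0 ≤ r → r < m → PySem.List.pyGetD c2 r 0 = (t2l.count r : Int) := by
          intro r hr0 hrm
          rw [hc2 r hr0 (by push_cast; omega)]
          congr 1
          rw [hs2, List.count_append, List.count_replicate, if_neg (by simp; omega)]
          omega
        have hres := ih t1l t2l ht1p ht2p
          (fun x hx => ⟨(e1 x (hs1 ▸ List.mem_append_right _ hx)).1, ht1lt x hx⟩)
          (fun x hx => ⟨(e2 x (hs2 ▸ List.mem_append_right _ hx)).1, ht2lt x hx⟩)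
          hcnt1' hcnt2' (rem - k1) (by omega) (by omega)
        rw [hres]
        congr 1
        rw [hs1, hs2, List.take_append, List.take_append, List.take_replicate,
            List.take_replicate, List.length_replicate, List.length_replicate,
            Nat.min_eq_right (by omega), Nat.min_eq_right (by omega)]
        have : List.replicate k2 (m : Int) = List.replicate k1 (m : Int) := by
          rw [show k2 = k1 by omega]
        rw [this, pvZipLoop_replicate, show rem - k2 = rem - k1 by omega]
    · -- unequal buckets: decided at this rank
      rw [if_pos (by simpa using fun h => hne (by exact_mod_cast h))]
      rcases Nat.lt_or_ge (min k2 rem) (min k1 rem) with hlt | hge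
      · rw [if_pos (by push_cast; omega)]
        rw [hs1, hs2, pvZipTopWin (m : Int) k1 k2 rem t1l t2l ht2lt
          (by omega) (by omega)]
        rfl
      · have hlt' : min k1 rem < min k2 rem := by omega
        rw [if_neg (by push_cast; omega)]
        rw [hs1, hs2, pvZipLoop_swap]
        rw [pvZipTopWin (m : Int) k2 k1 rem t2l t1l ht1lt (by omega) (by omega)]
        rfl

-- the bucket verdict on full count lists equals the zip-loop verdict on the sorted lists
theorem pvBucketMain (cards1 cards2 : List (String × String)) (v1 v2 c1 c2 : List Int)
    (hv1 : pvVals? cards1 = some v1) (hv2 : pvVals? cards2 = some v2)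
    (hc1 : pvCounts? cards1 = some c1) (hc2 : pvCounts? cards2 = some c2)
    (p1 : ∀ c ∈ cards1, c.1 ∈ CARD_VALUES) (p2 : ∀ c ∈ cards2, c.1 ∈ CARD_VALUES) :
    pvBucketLoop c1 c2 (PySem.List.pyRange 12 (-1) (-1))
        (min (cards1.length : Int) (cards2.length : Int)) =
      (pvZipLoop (PySem.List.sorted v1 (fun x => x) true)
                 (PySem.List.sorted v2 (fun x => x) true)).getD 0 := by
  obtain ⟨v1', c1', hv1', hc1', hvl1, hcl1, hvb1, hcnt1⟩ := pvCountsVals cards1 p1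
  obtain ⟨v2', c2', hv2', hc2', hvl2, hcl2, hvb2, hcnt2⟩ := pvCountsVals cards2 p2
  have ev1 : v1 = v1' := Option.some.inj (hv1.symm.trans hv1')
  have ev2 : v2 = v2' := Option.some.inj (hv2.symm.trans hv2')
  have ec1 : c1 = c1' := Option.some.inj (hc1.symm.trans hc1')
  have ec2 : c2 = c2' := Option.some.inj (hc2.symm.trans hc2')
  subst ev1; subst ev2; subst ec1; subst ec2
  have hp1 : (PySem.List.sorted v1 (fun x => x) true).Pairwise (· ≥ ·) :=
    (PySem.List.sorted_pairwise_rev v1 (fun x => x)).imp (fun h => h)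
  have hp2 : (PySem.List.sorted v2 (fun x => x) true).Pairwise (· ≥ ·) :=
    (PySem.List.sorted_pairwise_rev v2 (fun x => x)).imp (fun h => h)
  have he1 : ∀ x ∈ PySem.List.sorted v1 (fun x => x) true, 0 ≤ x ∧ x < (13 : Nat) := by
    intro x hx
    have := hvb1 x ((PySem.List.mem_sorted v1 (fun x => x) true x).mp hx)
    exact_mod_cast this
  have he2 : ∀ x ∈ PySem.List.sorted v2 (fun x => x) true, 0 ≤ x ∧ x < (13 : Nat) := by
    intro x hx
    have := hvb2 x ((PySem.List.mem_sorted v2 (fun x => x) true x).mp hx)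
    exact_mod_cast this
  have hq1 : ∀ r : Int, 0 ≤ r → r < (13 : Nat) →
      PySem.List.pyGetD c1 r 0 = ((PySem.List.sorted v1 (fun x => x) true).count r : Int) := by
    intro r hr0 hr13
    rw [hcnt1 r hr0 (by exact_mod_cast hr13)]
    exact_mod_cast ((PySem.List.sorted_perm v1 (fun x => x) true).count_eq r).symm
  have hq2 : ∀ r : Int, 0 ≤ r → r < (13 : Nat) →
      PySem.List.pyGetD c2 r 0 = ((PySem.List.sorted v2 (fun x => x) true).count r : Int) := by
    intro r hr0 hr13
    rw [hcnt2 r hr0 (by exact_mod_cast hr13)]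
    exact_mod_cast ((PySem.List.sorted_perm v2 (fun x => x) true).count_eq r).symm
  have hlen1 : (PySem.List.sorted v1 (fun x => x) true).length = cards1.length := by
    rw [PySem.List.length_sorted, hvl1]
  have hlen2 : (PySem.List.sorted v2 (fun x => x) true).length = cards2.length := by
    rw [PySem.List.length_sorted, hvl2]
  have hrm : min (cards1.length : Int) (cards2.length : Int) =
      ((min cards1.length cards2.length : Nat) : Int) := by push_cast; omega
  have h13 : ((13 : Nat) : Int) - 1 = 12 := by norm_num
  have hb := pvBucket_eq_zip 13 (PySem.List.sorted v1 (fun x => x) true)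
    (PySem.List.sorted v2 (fun x => x) true) hp1 hp2 he1 he2 c1 c2 hq1 hq2
    (min cards1.length cards2.length) (by omega) (by omega)
  rw [h13] at hb
  rw [hrm, hb]
  congr 1
  rw [pvZipLoop_take (PySem.List.sorted v1 (fun x => x) true)
      (PySem.List.sorted v2 (fun x => x) true), hlen1, hlen2]

-- ===== VERDICT (by name: the statement is the Claim_ definition above) =====
theorem compare_same_rank_hands_py_spec : Claim_equal_compare_same_rank_hands_py := by
  intro h1c h2c k1c k2c _ hpre
  obtain ⟨p1, p2, p3, p4⟩ := hpre
  obtain ⟨v1, c1, hv1, hc1, -, -, -, -⟩ := pvCountsVals h1c p1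
  obtain ⟨v2, c2, hv2, hc2, -, -, -, -⟩ := pvCountsVals h2c p2
  obtain ⟨w1, d1, hw1, hd1, -, -, -, -⟩ := pvCountsVals k1c p3
  obtain ⟨w2, d2, hw2, hd2, -, -, -, -⟩ := pvCountsVals k2c p4
  unfold Spec_compare_same_rank_hands_py compare_same_rank_hands_py compare_same_rank_hands_py_alt
  rw [hv1, hv2, hw1, hw2, hc1, hc2, hd1, hd2]
  simp only
  rw [pvBucketMain h1c h2c v1 v2 c1 c2 hv1 hv2 hc1 hc2 p1 p2,
      pvBucketMain k1c k2c w1 w2 d1 d2 hw1 hw2 hd1 hd2 p3 p4]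
  cases hz : pvZipLoop (PySem.List.sorted v1 (fun x => x) true)
      (PySem.List.sorted v2 (fun x => x) true) with
  | none =>
    simp only [Option.getD_none]
    rw [if_neg (by simp)]
    cases hk : pvZipLoop (PySem.List.sorted w1 (fun x => x) true)
        (PySem.List.sorted w2 (fun x => x) true) <;> rfl
  | some r =>
    simp only [Option.getD_some]
    rw [if_pos (pvZipLoop_ne_zero _ _ r hz)]
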